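-- pv_equiv track=rewrite | github.com/rahul5569/ETLproject | processing/processing_service.py | recursive_text_splitter
-- ===== SOURCE A (Python) =====
-- def recursive_text_splitter(text, max_chunk_size):
--     """
--     Recursively splits text into chunks of up to 'max_chunk_size' characters.
--     """
--     chunks = []
--
--     def split_recursively(subtext):
--         if len(subtext) <= max_chunk_size:
--             chunks.append(subtext)
--             return
--         else:
--             # Find the last space character within the max_chunk_size
--             split_point = max_chunk_size
--             while split_point > 0 and subtext[split_point - 1] != ' ':
--                 split_point -= 1
--             if split_point == 0:
--                 # If no space is found, split at max_chunk_size
--                 split_point = max_chunk_size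
--             # Recursively split the remaining text
--             chunks.append(subtext[:split_point].rstrip())
--             split_recursively(subtext[split_point:].lstrip())
--
--     split_recursively(text)
--     return chunks
-- ===== SOURCE B (Python) =====
-- def recursive_text_splitter(text, max_chunk_size):
--     n = len(text)
--     chunks = []
--     i = 0
--     while n - i > max_chunk_size:
--         j = i + max_chunk_size
--         while j > i and text[j - 1] != ' ':
--             j -= 1
--         if j == i:
--             j = i + max_chunk_size
--         chunks.append(text[i:j].rstrip())
--         i = j
--         while i < n and text[i].isspace():
--             i += 1
--     chunks.append(text[i:])
--     return chunks
-- ===== Notes on version B (the rewrite author's own statement) =====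
-- stated objective: alternative
-- what changed: Replaced A's recursion over ever-shorter substring copies (each step slices and strips new strings) by one iterative index-based scan over the original string, keeping only chunk boundaries as indices.
import Mathlib
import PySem

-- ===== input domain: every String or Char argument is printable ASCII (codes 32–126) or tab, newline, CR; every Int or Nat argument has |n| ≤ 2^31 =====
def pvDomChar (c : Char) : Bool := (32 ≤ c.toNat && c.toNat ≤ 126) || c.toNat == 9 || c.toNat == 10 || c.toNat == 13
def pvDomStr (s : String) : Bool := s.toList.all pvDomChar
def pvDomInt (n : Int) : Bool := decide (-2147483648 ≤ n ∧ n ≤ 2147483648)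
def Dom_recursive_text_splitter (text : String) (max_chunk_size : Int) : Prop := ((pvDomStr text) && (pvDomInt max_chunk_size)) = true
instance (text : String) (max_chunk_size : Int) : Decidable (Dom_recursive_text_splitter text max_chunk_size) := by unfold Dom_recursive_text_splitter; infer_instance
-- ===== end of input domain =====

-- B replaces A's recursion over ever-shorter substring copies by a single iterative
-- index-based scan over the original string (objective: alternative).

-- ===== PORT A =====
-- inner while: 'while split_point > 0 and subtext[split_point-1] != " ": split_point -= 1'
-- (the index split_point-1 is always in range when reached; getD's default only totalizes)
def pvFindSpA (sub : List Char) : Nat → Nat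
  | 0 => 0
  | p+1 => if sub.getD p ' ' ≠ ' ' then pvFindSpA sub p else p+1

-- 'split_recursively'; fuel (length+1 at top level) only totalizes the recursion that
-- Python performs unboundedly when max_chunk_size ≤ 0 (those inputs are outside Pre_)
def pvSplitRec (m : Int) : Nat → List Char → List (List Char)
  | 0, _ => []
  | fuel+1, sub =>
    if (sub.length : Int) ≤ m then [sub]
    else
      let sp0 := pvFindSpA sub m.toNat   -- split_point after the while loop (m > 0 here on Pre_)
      let sp := if sp0 = 0 then m.toNat else sp0
      PySem.Chars.rstrip (sub.take sp) :: pvSplitRec m fuel (PySem.Chars.lstrip (sub.drop sp))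

def recursive_text_splitter (text : String) (max_chunk_size : Int) : List String :=
  (pvSplitRec max_chunk_size (text.toList.length + 1) text.toList).map String.ofList

-- ===== PORT B =====
-- inner while: 'while j > i and text[j-1] != " ": j -= 1'
def pvFindSpB (cs : List Char) (i j : Nat) : Nat :=
  if i < j then (if cs.getD (j-1) ' ' ≠ ' ' then pvFindSpB cs i (j-1) else j) else j
termination_by j
decreasing_by omega

-- 'while i < n and text[i].isspace(): i += 1'
def pvSkipWS (cs : List Char) (i : Nat) : Nat :=
  if i < cs.length ∧ PySem.Chars.isspace (cs.getD i ' ') then pvSkipWS cs (i+1) else i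
termination_by cs.length - i
decreasing_by omega

-- main 'while n - i > max_chunk_size' loop; fuel only totalizes it (see Pre_)
def pvBLoop (cs : List Char) (m : Int) : Nat → Nat → List (List Char) → List (List Char)
  | 0, _, acc => acc
  | fuel+1, i, acc =>
    if (cs.length : Int) - (i : Int) ≤ m then acc ++ [cs.drop i]
    else
      let j0 := pvFindSpB cs i (i + m.toNat)
      let j := if j0 = i then i + m.toNat else j0
      pvBLoop cs m fuel (pvSkipWS cs j) (acc ++ [PySem.Chars.rstrip ((cs.drop i).take (j - i))])

def recursive_text_splitter_alt (text : String) (max_chunk_size : Int) : List String :=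
  (pvBLoop text.toList max_chunk_size (text.toList.length + 1) 0 []).map String.ofList

-- ===== PRECONDITION & SPEC =====
-- Pre_ excludes exactly the inputs on which Python A recurses forever (RecursionError):
-- max_chunk_size < 0, or max_chunk_size = 0 with text containing a non-whitespace character.
def Pre_recursive_text_splitter (text : String) (max_chunk_size : Int) : Prop :=
  1 ≤ max_chunk_size ∨ (max_chunk_size = 0 ∧ text.toList.all PySem.Chars.isspace = true)
instance (text : String) (max_chunk_size : Int) : Decidable (Pre_recursive_text_splitter text max_chunk_size) := by unfold Pre_recursive_text_splitter; infer_instance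

def pvWitness_recursive_text_splitter : String × Int := ("hello wide world", 7)

def Spec_recursive_text_splitter (text : String) (max_chunk_size : Int) (out : List String) : Prop := out = recursive_text_splitter_alt text max_chunk_size
instance (text : String) (max_chunk_size : Int) (out : List String) : Decidable (Spec_recursive_text_splitter text max_chunk_size out) := by unfold Spec_recursive_text_splitter; infer_instance

-- ===== CLAIM (what is proved, stated in full; the proofs are below) =====
def Claim_equal_recursive_text_splitter : Prop := ∀ (text : String) (max_chunk_size : Int), Dom_recursive_text_splitter text max_chunk_size → Pre_recursive_text_splitter text max_chunk_size → Spec_recursive_text_splitter text max_chunk_size (recursive_text_splitter text max_chunk_size)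

-- ===== LEMMAS AND PROOFS =====

theorem pvGetD_drop (cs : List Char) (i p : Nat) (d : Char) :
    (cs.drop i).getD p d = cs.getD (i + p) d := by
  simp [List.getD, List.getElem?_drop]

theorem pvFindSpA_le (sub : List Char) (p : Nat) : pvFindSpA sub p ≤ p := by
  induction p with
  | zero => simp [pvFindSpA]
  | succ q ih => simp only [pvFindSpA]; split <;> omega

theorem pvFindSpB_eq (cs : List Char) (i p : Nat) :
    pvFindSpB cs i (i + p) = i + pvFindSpA (cs.drop i) p := by
  induction p with
  | zero => rw [pvFindSpB]; simp [pvFindSpA]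
  | succ q ih =>
    rw [pvFindSpB]
    have h1 : i < i + (q + 1) := by omega
    have h2 : i + (q + 1) - 1 = i + q := by omega
    simp only [h1, if_true, h2, pvFindSpA, ← pvGetD_drop cs i q ' ']
    split <;> simp [ih]

theorem pvSkipWS_drop (cs : List Char) (i : Nat) :
    cs.drop (pvSkipWS cs i) = PySem.Chars.lstrip (cs.drop i) := by
  by_cases h : i < cs.length
  · have hdrop : cs.drop i = cs[i] :: cs.drop (i + 1) := List.drop_eq_getElem_cons h
    have hgd : cs.getD i ' ' = cs[i] := by simp [List.getD, List.getElem?_eq_getElem h]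
    rw [pvSkipWS]
    by_cases hs : PySem.Chars.isspace cs[i]
    · have : i < cs.length ∧ PySem.Chars.isspace (cs.getD i ' ') = true := ⟨h, by rw [hgd]; exact hs⟩
      rw [if_pos this, pvSkipWS_drop cs (i+1)]
      unfold PySem.Chars.lstrip
      conv_rhs => rw [hdrop, List.dropWhile_cons, if_pos hs]
    · have : ¬ (i < cs.length ∧ PySem.Chars.isspace (cs.getD i ' ') = true) := by
        intro hc; exact hs (by rw [← hgd]; exact hc.2)
      rw [if_neg this]
      unfold PySem.Chars.lstrip
      conv_rhs => rw [hdrop, List.dropWhile_cons, if_neg hs]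
      exact hdrop
  · rw [pvSkipWS]
    have : ¬ (i < cs.length ∧ PySem.Chars.isspace (cs.getD i ' ') = true) := by
      intro hc; exact h hc.1
    rw [if_neg this]
    have : cs.drop i = [] := List.drop_eq_nil_of_le (by omega)
    simp [this, PySem.Chars.lstrip]
termination_by cs.length - i
decreasing_by omega

theorem pvSkipWS_le (cs : List Char) (i : Nat) (h : i ≤ cs.length) : pvSkipWS cs i ≤ cs.length := by
  rw [pvSkipWS]
  split
  · exact pvSkipWS_le cs (i+1) (by omega)
  · exact h
termination_by cs.length - i
decreasing_by omega

theorem pvBLoop_eq (cs : List Char) (m : Int) (fuel : Nat) :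
    ∀ (i : Nat) (acc : List (List Char)), i ≤ cs.length →
      pvBLoop cs m fuel i acc = acc ++ pvSplitRec m fuel (cs.drop i) := by
  induction fuel with
  | zero => intro i acc _; simp [pvBLoop, pvSplitRec]
  | succ f ih =>
    intro i acc hi
    have hlen : ((cs.drop i).length : Int) = (cs.length : Int) - (i : Int) := by
      rw [List.length_drop]; omega
    rw [pvBLoop, pvSplitRec]
    by_cases hc : (cs.length : Int) - (i : Int) ≤ m
    · rw [if_pos hc, if_pos (by rw [hlen]; exact hc)]
    · rw [if_neg hc, if_neg (by rw [hlen]; exact hc)]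
      have hB := pvFindSpB_eq cs i m.toNat
      set sp0 := pvFindSpA (cs.drop i) m.toNat with hsp0
      set sp := if sp0 = 0 then m.toNat else sp0 with hsp
      have hj0 : pvFindSpB cs i (i + m.toNat) = i + sp0 := hB
      have hj : (if i + sp0 = i then i + m.toNat else i + sp0) = i + sp := by
        by_cases h0 : sp0 = 0 <;> simp [hsp, h0]
      have hspm : sp ≤ m.toNat := by
        have := pvFindSpA_le (cs.drop i) m.toNat
        by_cases h0 : sp0 = 0
        · simp [hsp, h0]
        · simp [hsp, h0]; omega
      have hjlen : i + sp ≤ cs.length := by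
        by_cases hm : 0 ≤ m
        · have : (i : Int) + m < cs.length := by omega
          have : i + m.toNat ≤ cs.length := by omega
          omega
        · have : m.toNat = 0 := Int.toNat_of_nonpos (by omega)
          have h0 : sp0 = 0 := by
            rw [hsp0, this]; simp [pvFindSpA]
          simp [hsp, h0, this]; omega
      have hsub : i + sp - i = sp := by omega
      have hdd : cs.drop (i + sp) = (cs.drop i).drop sp := by
        rw [List.drop_drop]
      simp only [hj0, hj, hsub, ← hsp]
      rw [ih (pvSkipWS cs (i + sp)) _ (pvSkipWS_le cs (i + sp) hjlen),
        pvSkipWS_drop cs (i + sp), hdd]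
      simp

-- ===== VERDICT (by name: the statement is the Claim_ definition above) =====
theorem recursive_text_splitter_spec : Claim_equal_recursive_text_splitter := by
  intro text m _ _
  unfold Spec_recursive_text_splitter recursive_text_splitter recursive_text_splitter_alt
  rw [pvBLoop_eq text.toList m (text.toList.length + 1) 0 [] (by omega)]
  simp
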